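-- pv_equiv track=rewrite | github.com/JiaweiHawk/Fucking-Cryptography | Final/py/Aes.py | matrix2stream
-- ===== SOURCE A (Python) =====
-- def matrix2stream(matrix):
--     stream = [0] * 16
--     count = 0
--     for i in range(4):
--         for j in range(4):
--             stream[count] = matrix[ (j * 4 + i) * 2 : (j * 4 + i + 1) * 2]
--             count = count + 1
--     return ''.join(stream)
-- ===== SOURCE B (Python) =====
-- def matrix2stream(matrix):
--     order = sorted(range(16), key=lambda k: k % 4)
--     return ''.join(matrix[k * 2:(k + 1) * 2] for k in order)
-- ===== Notes on version B (the rewrite author's own statement) =====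
-- stated objective: alternative
-- what changed: Replaces the nested index-arithmetic loops over a mutable 16-slot list with a stable sort of the token indices by column (k % 4) and a single join of the slices in that order.
import Mathlib
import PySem

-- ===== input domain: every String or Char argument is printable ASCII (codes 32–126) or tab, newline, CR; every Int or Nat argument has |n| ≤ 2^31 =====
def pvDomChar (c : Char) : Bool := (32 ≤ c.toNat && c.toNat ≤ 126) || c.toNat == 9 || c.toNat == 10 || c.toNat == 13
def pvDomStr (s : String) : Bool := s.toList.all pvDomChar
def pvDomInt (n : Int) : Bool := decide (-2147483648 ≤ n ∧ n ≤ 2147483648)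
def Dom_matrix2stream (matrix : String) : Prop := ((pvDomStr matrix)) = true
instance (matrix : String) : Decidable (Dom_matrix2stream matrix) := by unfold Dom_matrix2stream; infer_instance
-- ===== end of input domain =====

-- B emits the 16 two-char tokens in the order given by a stable sort of the token indices by column (k % 4), instead of A's nested loops writing into a mutable 16-slot list (objective: alternative; same cost).
-- ===== PORT A =====
-- A: nested loops writing matrix[(j*4+i)*2:(j*4+i+1)*2] into stream[count]; stream's [0]*16
-- initial ints are all overwritten before the join, so the slots start as "" here.
def matrix2stream (matrix : String) : String :=
  let st0 : List String × Int := (List.replicate 16 "", 0)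
  let st := (PySem.List.pyRange 0 4 1).foldl (fun st i =>
    (PySem.List.pyRange 0 4 1).foldl (fun (st : List String × Int) j =>
      (st.1.set st.2.toNat
        (PySem.Str.slice matrix (some ((j * 4 + i) * 2)) (some ((j * 4 + i + 1) * 2))),
       st.2 + 1)) st) st0
  PySem.Str.join "" st.1

-- ===== PORT B =====
-- B: order = sorted(range(16), key=lambda k: k % 4)  (stable sort groups indices by column),
-- then join the slices matrix[k*2:(k+1)*2] in that order.
def matrix2stream_alt (matrix : String) : String :=
  let order := PySem.List.sorted (PySem.List.pyRange 0 16 1) (fun k => PySem.Int.mod k 4) false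
  PySem.Str.join "" (order.map (fun k =>
    PySem.Str.slice matrix (some (k * 2)) (some ((k + 1) * 2))))

-- ===== PRECONDITION & SPEC =====
def Spec_matrix2stream (matrix : String) (out : String) : Prop := out = matrix2stream_alt matrix
instance (matrix : String) (out : String) : Decidable (Spec_matrix2stream matrix out) := by unfold Spec_matrix2stream; infer_instance

-- ===== CLAIM (what is proved, stated in full; the proofs are below) =====
def Claim_equal_matrix2stream : Prop := ∀ (matrix : String), Dom_matrix2stream matrix → Spec_matrix2stream matrix (matrix2stream matrix)

-- ===== LEMMAS AND PROOFS =====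

-- ===== VERDICT (by name: the statement is the Claim_ definition above) =====
theorem matrix2stream_spec : Claim_equal_matrix2stream := by
  intro matrix _
  show matrix2stream matrix = matrix2stream_alt matrix
  have h4 : PySem.List.pyRange 0 4 1 = [0, 1, 2, 3] := by decide
  have horder : PySem.List.sorted (PySem.List.pyRange 0 16 1) (fun k => PySem.Int.mod k 4) false
      = [0, 4, 8, 12, 1, 5, 9, 13, 2, 6, 10, 14, 3, 7, 11, 15] := by decide
  simp only [matrix2stream, matrix2stream_alt, h4, horder, List.foldl, List.map]
  have e0 : Int.toNat 0 = 0 := rfl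
  have e1 : Int.toNat 1 = 1 := rfl
  have e2 : Int.toNat 2 = 2 := rfl
  have e3 : Int.toNat 3 = 3 := rfl
  have e4 : Int.toNat 4 = 4 := rfl
  have e5 : Int.toNat 5 = 5 := rfl
  have e6 : Int.toNat 6 = 6 := rfl
  have e7 : Int.toNat 7 = 7 := rfl
  have e8 : Int.toNat 8 = 8 := rfl
  have e9 : Int.toNat 9 = 9 := rfl
  have e10 : Int.toNat 10 = 10 := rfl
  have e11 : Int.toNat 11 = 11 := rfl
  have e12 : Int.toNat 12 = 12 := rfl
  have e13 : Int.toNat 13 = 13 := rfl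
  have e14 : Int.toNat 14 = 14 := rfl
  have e15 : Int.toNat 15 = 15 := rfl
  have e16 : Int.toNat 16 = 16 := rfl
  have e17 : Int.toNat 17 = 17 := rfl
  have e18 : Int.toNat 18 = 18 := rfl
  have e19 : Int.toNat 19 = 19 := rfl
  have e20 : Int.toNat 20 = 20 := rfl
  have e21 : Int.toNat 21 = 21 := rfl
  have e22 : Int.toNat 22 = 22 := rfl
  have e23 : Int.toNat 23 = 23 := rfl
  have e24 : Int.toNat 24 = 24 := rfl
  have e25 : Int.toNat 25 = 25 := rfl
  have e26 : Int.toNat 26 = 26 := rfl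
  have e27 : Int.toNat 27 = 27 := rfl
  have e28 : Int.toNat 28 = 28 := rfl
  have e29 : Int.toNat 29 = 29 := rfl
  have e30 : Int.toNat 30 = 30 := rfl
  have e31 : Int.toNat 31 = 31 := rfl
  have e32 : Int.toNat 32 = 32 := rfl
  norm_num [PySem.Str.slice, PySem.List.slice, PySem.List.clampIdx, e0, e1, e2, e3, e4, e5, e6, e7, e8, e9, e10, e11, e12, e13, e14, e15, e16, e17, e18, e19, e20, e21, e22, e23, e24, e25, e26, e27, e28, e29, e30, e31, e32]
  norm_num [List.set, List.replicate,
    PySem.Str.join, PySem.Chars.join, List.take_succ_cons, List.drop_succ_cons,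
    List.intercalate, List.map, e0, e1, e2, e3, e4, e5, e6, e7, e8, e9, e10, e11, e12, e13, e14, e15, e16, e17, e18, e19, e20, e21, e22, e23, e24, e25, e26, e27, e28, e29, e30, e31, e32]
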